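-- pv_equiv track=rewrite | github.com/chethanone/OncoNutri | backend/fastapi_ml/utils/ai_recommendations_v2.py | _get_symptom_instructions
-- ===== SOURCE A (Python) =====
-- def _get_symptom_instructions(symptoms):
--     """Get instructions based on patient symptoms"""
--     if not symptoms:
--         return ""
--
--     instructions = ["**SYMPTOM-BASED RESTRICTIONS:**"]
--
--     for symptom in symptoms:
--         symptom_lower = symptom.lower()
--         if 'nausea' in symptom_lower or 'vomiting' in symptom_lower:
--             instructions.append("- AVOID: Greasy, fried, spicy, or strong-smelling foods")
--             instructions.append("- PREFER: Bland, cool, easy-to-digest foods")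
--         elif 'diarrhea' in symptom_lower:
--             instructions.append("- AVOID: High-fiber, fatty, spicy, or dairy-heavy foods")
--             instructions.append("- PREFER: Low-fiber, binding foods (banana, rice, toast)")
--         elif 'constipation' in symptom_lower:
--             instructions.append("- PREFER: High-fiber foods, warm liquids, prunes")
--         elif 'sore' in symptom_lower and 'mouth' in symptom_lower:
--             instructions.append("- AVOID: Spicy, acidic, rough-textured, or very hot foods")
--             instructions.append("- PREFER: Soft, cool, smooth foods")
--         elif 'fatigue' in symptom_lower or 'weakness' in symptom_lower:
--             instructions.append("- PREFER: Energy-dense, protein-rich, easy-to-eat foods")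
--
--     return "\n".join(instructions) if len(instructions) > 1 else ""
-- ===== SOURCE B (Python) =====
-- # B: two staged passes with a keyword->category map: collect ALL matching
-- # categories per symptom and take the minimum (instead of a first-match
-- # elif chain), then expand category codes to instruction lines at the end.
-- _KEYWORDS = [
--     ('nausea', 0), ('vomiting', 0),
--     ('diarrhea', 1),
--     ('constipation', 2),
--     ('fatigue', 4), ('weakness', 4),
-- ]
--
-- _LINES = [
--     ["- AVOID: Greasy, fried, spicy, or strong-smelling foods",
--      "- PREFER: Bland, cool, easy-to-digest foods"],
--     ["- AVOID: High-fiber, fatty, spicy, or dairy-heavy foods",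
--      "- PREFER: Low-fiber, binding foods (banana, rice, toast)"],
--     ["- PREFER: High-fiber foods, warm liquids, prunes"],
--     ["- AVOID: Spicy, acidic, rough-textured, or very hot foods",
--      "- PREFER: Soft, cool, smooth foods"],
--     ["- PREFER: Energy-dense, protein-rich, easy-to-eat foods"],
-- ]
--
--
-- def _get_symptom_instructions(symptoms):
--     cats = []
--     for symptom in symptoms:
--         s = symptom.lower()
--         hits = [c for kw, c in _KEYWORDS if kw in s]
--         if 'sore' in s and 'mouth' in s:
--             hits.append(3)
--         if hits:
--             cats.append(min(hits))
--     body = [line for c in cats for line in _LINES[c]]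
--     return "\n".join(["**SYMPTOM-BASED RESTRICTIONS:**"] + body) if body else ""
-- ===== Notes on version B (the rewrite author's own statement) =====
-- stated objective: alternative
-- what changed: Instead of an if/elif chain that appends lines per symptom, B maps each symptom to a numeric category by collecting ALL matching keywords from a keyword->category table (plus the sore+mouth pair) and taking the minimum, then expands the category codes to instruction lines in a separate final pass; correct because the elif branches are ordered by category number, so the first true branch is exactly the minimal matching category.
import Mathlib
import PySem

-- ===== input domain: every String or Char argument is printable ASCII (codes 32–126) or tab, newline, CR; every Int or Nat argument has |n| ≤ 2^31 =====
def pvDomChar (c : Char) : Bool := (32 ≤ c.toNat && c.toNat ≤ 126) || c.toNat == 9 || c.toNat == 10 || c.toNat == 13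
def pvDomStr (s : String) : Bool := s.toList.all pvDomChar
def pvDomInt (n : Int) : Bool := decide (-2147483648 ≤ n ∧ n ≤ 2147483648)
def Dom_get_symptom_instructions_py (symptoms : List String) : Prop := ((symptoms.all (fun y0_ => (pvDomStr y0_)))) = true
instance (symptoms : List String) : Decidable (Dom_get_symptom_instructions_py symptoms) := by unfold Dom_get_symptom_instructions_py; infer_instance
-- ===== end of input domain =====

-- B replaces the per-symptom if/elif chain by two staged passes: a keyword->category
-- map whose matches are collected and minimised per symptom, then category codes are
-- expanded to instruction lines at the end (alternative decomposition, same cost).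


-- ===== PORT A =====
def get_symptom_instructions_py (symptoms : List String) : String :=
  if symptoms = [] then ""
  else
    let instructions := symptoms.foldl (fun instructions symptom =>
      let symptom_lower := PySem.Str.lower symptom
      if PySem.Str.isIn "nausea" symptom_lower || PySem.Str.isIn "vomiting" symptom_lower then
        instructions ++ ["- AVOID: Greasy, fried, spicy, or strong-smelling foods"]
                     ++ ["- PREFER: Bland, cool, easy-to-digest foods"]
      else if PySem.Str.isIn "diarrhea" symptom_lower then
        instructions ++ ["- AVOID: High-fiber, fatty, spicy, or dairy-heavy foods"]
                     ++ ["- PREFER: Low-fiber, binding foods (banana, rice, toast)"]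
      else if PySem.Str.isIn "constipation" symptom_lower then
        instructions ++ ["- PREFER: High-fiber foods, warm liquids, prunes"]
      else if PySem.Str.isIn "sore" symptom_lower && PySem.Str.isIn "mouth" symptom_lower then
        instructions ++ ["- AVOID: Spicy, acidic, rough-textured, or very hot foods"]
                     ++ ["- PREFER: Soft, cool, smooth foods"]
      else if PySem.Str.isIn "fatigue" symptom_lower || PySem.Str.isIn "weakness" symptom_lower then
        instructions ++ ["- PREFER: Energy-dense, protein-rich, easy-to-eat foods"]
      else instructions) ["**SYMPTOM-BASED RESTRICTIONS:**"]
    if instructions.length > 1 then PySem.Str.join "\n" instructions else ""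

-- ===== PORT B =====
def symptomKeywords : List (String × Nat) :=
  [("nausea", 0), ("vomiting", 0), ("diarrhea", 1), ("constipation", 2),
   ("fatigue", 4), ("weakness", 4)]

def symptomLines : List (List String) :=
  [ ["- AVOID: Greasy, fried, spicy, or strong-smelling foods",
     "- PREFER: Bland, cool, easy-to-digest foods"],
    ["- AVOID: High-fiber, fatty, spicy, or dairy-heavy foods",
     "- PREFER: Low-fiber, binding foods (banana, rice, toast)"],
    ["- PREFER: High-fiber foods, warm liquids, prunes"],
    ["- AVOID: Spicy, acidic, rough-textured, or very hot foods",
     "- PREFER: Soft, cool, smooth foods"],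
    ["- PREFER: Energy-dense, protein-rich, easy-to-eat foods"] ]

-- per-symptom category: all matching keyword categories, plus the sore+mouth pair, minimised
def classifySymptom (s : String) : Option Nat :=
  let hits := (symptomKeywords.filter (fun kc => PySem.Str.isIn kc.1 s)).map (·.2)
  let hits := if PySem.Str.isIn "sore" s && PySem.Str.isIn "mouth" s then hits ++ [3] else hits
  hits.min?

def get_symptom_instructions_py_alt (symptoms : List String) : String :=
  let cats := symptoms.foldl (fun cats symptom =>
    match classifySymptom (PySem.Str.lower symptom) with
    | some c => cats ++ [c]
    | none => cats) []
  -- _LINES[c] with c always 0..4, so getD [] is exact here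
  let body := cats.flatMap (fun c => symptomLines.getD c [])
  if body ≠ [] then PySem.Str.join "\n" (["**SYMPTOM-BASED RESTRICTIONS:**"] ++ body) else ""

-- ===== PRECONDITION & SPEC =====
def Spec_get_symptom_instructions_py (symptoms : List String) (out : String) : Prop := out = get_symptom_instructions_py_alt symptoms
instance (symptoms : List String) (out : String) : Decidable (Spec_get_symptom_instructions_py symptoms out) := by unfold Spec_get_symptom_instructions_py; infer_instance

-- ===== CLAIM (what is proved, stated in full; the proofs are below) =====
def Claim_equal_get_symptom_instructions_py : Prop := ∀ (symptoms : List String), Dom_get_symptom_instructions_py symptoms → Spec_get_symptom_instructions_py symptoms (get_symptom_instructions_py symptoms)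

-- ===== LEMMAS AND PROOFS =====

-- one step of A's elif chain appends exactly the lines of the symptom's minimal category
theorem step_eq (instructions : List String) (symptom : String) :
    (let symptom_lower := PySem.Str.lower symptom
      if PySem.Str.isIn "nausea" symptom_lower || PySem.Str.isIn "vomiting" symptom_lower then
        instructions ++ ["- AVOID: Greasy, fried, spicy, or strong-smelling foods"]
                     ++ ["- PREFER: Bland, cool, easy-to-digest foods"]
      else if PySem.Str.isIn "diarrhea" symptom_lower then
        instructions ++ ["- AVOID: High-fiber, fatty, spicy, or dairy-heavy foods"]
                     ++ ["- PREFER: Low-fiber, binding foods (banana, rice, toast)"]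
      else if PySem.Str.isIn "constipation" symptom_lower then
        instructions ++ ["- PREFER: High-fiber foods, warm liquids, prunes"]
      else if PySem.Str.isIn "sore" symptom_lower && PySem.Str.isIn "mouth" symptom_lower then
        instructions ++ ["- AVOID: Spicy, acidic, rough-textured, or very hot foods"]
                     ++ ["- PREFER: Soft, cool, smooth foods"]
      else if PySem.Str.isIn "fatigue" symptom_lower || PySem.Str.isIn "weakness" symptom_lower then
        instructions ++ ["- PREFER: Energy-dense, protein-rich, easy-to-eat foods"]
      else instructions)
    = instructions ++ (match classifySymptom (PySem.Str.lower symptom) with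
                       | some c => symptomLines.getD c []
                       | none => []) := by
  simp only [classifySymptom, symptomKeywords, symptomLines]
  by_cases h1 : PySem.Str.isIn "nausea" (PySem.Str.lower symptom) <;>
  by_cases h2 : PySem.Str.isIn "vomiting" (PySem.Str.lower symptom) <;>
  by_cases h3 : PySem.Str.isIn "diarrhea" (PySem.Str.lower symptom) <;>
  by_cases h4 : PySem.Str.isIn "constipation" (PySem.Str.lower symptom) <;>
  by_cases h5 : PySem.Str.isIn "sore" (PySem.Str.lower symptom) <;>
  by_cases h6 : PySem.Str.isIn "mouth" (PySem.Str.lower symptom) <;>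
  by_cases h7 : PySem.Str.isIn "fatigue" (PySem.Str.lower symptom) <;>
  by_cases h8 : PySem.Str.isIn "weakness" (PySem.Str.lower symptom) <;>
  simp [PySem.Str.isIn, PySem.Str.lower] at h1 h2 h3 h4 h5 h6 h7 h8 <;>
  simp [h1, h2, h3, h4, h5, h6, h7, h8, List.min?, PySem.Str.isIn, PySem.Str.lower]

def catsOf (symptoms : List String) : List Nat :=
  symptoms.filterMap (fun s => classifySymptom (PySem.Str.lower s))

theorem cats_fold_eq (symptoms : List String) (cats : List Nat) :
    symptoms.foldl (fun cats symptom =>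
      match classifySymptom (PySem.Str.lower symptom) with
      | some c => cats ++ [c]
      | none => cats) cats = cats ++ catsOf symptoms := by
  induction symptoms generalizing cats with
  | nil => simp [catsOf]
  | cons s rest ih =>
      simp only [List.foldl_cons, catsOf, List.filterMap_cons]
      cases classifySymptom (PySem.Str.lower s) <;>
        simp [ih, catsOf]

theorem fold_eq (symptoms : List String) (init : List String) :
    symptoms.foldl (fun instructions symptom =>
      let symptom_lower := PySem.Str.lower symptom
      if PySem.Str.isIn "nausea" symptom_lower || PySem.Str.isIn "vomiting" symptom_lower then
        instructions ++ ["- AVOID: Greasy, fried, spicy, or strong-smelling foods"]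
                     ++ ["- PREFER: Bland, cool, easy-to-digest foods"]
      else if PySem.Str.isIn "diarrhea" symptom_lower then
        instructions ++ ["- AVOID: High-fiber, fatty, spicy, or dairy-heavy foods"]
                     ++ ["- PREFER: Low-fiber, binding foods (banana, rice, toast)"]
      else if PySem.Str.isIn "constipation" symptom_lower then
        instructions ++ ["- PREFER: High-fiber foods, warm liquids, prunes"]
      else if PySem.Str.isIn "sore" symptom_lower && PySem.Str.isIn "mouth" symptom_lower then
        instructions ++ ["- AVOID: Spicy, acidic, rough-textured, or very hot foods"]
                     ++ ["- PREFER: Soft, cool, smooth foods"]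
      else if PySem.Str.isIn "fatigue" symptom_lower || PySem.Str.isIn "weakness" symptom_lower then
        instructions ++ ["- PREFER: Energy-dense, protein-rich, easy-to-eat foods"]
      else instructions) init
    = init ++ (catsOf symptoms).flatMap (fun c => symptomLines.getD c []) := by
  induction symptoms generalizing init with
  | nil => simp [catsOf]
  | cons s rest ih =>
      rw [List.foldl_cons, step_eq]
      rw [ih]
      simp only [catsOf, List.filterMap_cons]
      cases classifySymptom (PySem.Str.lower s) <;> simp

-- ===== VERDICT (by name: the statement is the Claim_ definition above) =====
theorem get_symptom_instructions_py_spec : Claim_equal_get_symptom_instructions_py := by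
  intro symptoms _
  unfold Spec_get_symptom_instructions_py get_symptom_instructions_py get_symptom_instructions_py_alt
  cases symptoms with
  | nil => rfl
  | cons s rest =>
      simp only [reduceCtorEq, if_false, fold_eq, cats_fold_eq, List.nil_append]
      cases (catsOf (s :: rest)).flatMap (fun c => symptomLines.getD c []) with
      | nil => simp
      | cons b bs => simp
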